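-- pv_equiv track=rewrite | github.com/dmalmq/shp2imdf-converter | backend/src/detector.py | merge_learned_keywords
-- ===== SOURCE A (Python) =====
-- import copy
--
-- FEATURE_TYPE_VALUES = {
--     "unit",
--     "opening",
--     "fixture",
--     "detail",
--     "level",
--     "building",
--     "venue",
--     "amenity",
--     "anchor",
--     "geofence",
--     "kiosk",
--     "occupant",
--     "relationship",
--     "section",
--     "facility",
-- }
--
-- def merge_learned_keywords(
--     base_keywords: dict[str, set[str]],
--     learned_keywords: dict[str, str],
-- ) -> dict[str, set[str]]:
--     merged = copy.deepcopy(base_keywords)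
--     for keyword, feature_type in learned_keywords.items():
--         if feature_type not in FEATURE_TYPE_VALUES:
--             continue
--         merged.setdefault(feature_type, set()).add(keyword.lower())
--     return merged
-- ===== SOURCE B (Python) =====
-- FEATURE_TYPE_VALUES = {
--     "unit",
--     "opening",
--     "fixture",
--     "detail",
--     "level",
--     "building",
--     "venue",
--     "amenity",
--     "anchor",
--     "geofence",
--     "kiosk",
--     "occupant",
--     "relationship",
--     "section",
--     "facility",
-- }
--
--
-- def merge_learned_keywords(
--     base_keywords: dict[str, set[str]],
--     learned_keywords: dict[str, str],
-- ) -> dict[str, set[str]]: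
--     # Pass 1: group the valid learned keywords into per-feature-type buckets.
--     valid = [
--         (feature_type, keyword.lower())
--         for keyword, feature_type in learned_keywords.items()
--         if feature_type in FEATURE_TYPE_VALUES
--     ]
--     buckets: dict[str, set[str]] = {}
--     for feature_type, keyword in valid:
--         buckets.setdefault(feature_type, set()).add(keyword)
--     # Pass 2: union each base entry with its bucket ('|' builds a fresh set,
--     # so base_keywords is never mutated), then append the leftover buckets.
--     merged = {ft: kws | buckets.pop(ft, set()) for ft, kws in base_keywords.items()}
--     merged.update(buckets)
--     return merged
-- ===== Notes on version B (the rewrite author's own statement) =====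
-- stated objective: alternative
-- what changed: A mutates a deep copy of the base dict while iterating the learned keywords once; B first groups the valid learned keywords into per-feature-type buckets and then builds the result in a second pass, unioning each base entry with its bucket ('|' makes fresh sets, no deepcopy) and appending the leftover buckets.
import Mathlib
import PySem

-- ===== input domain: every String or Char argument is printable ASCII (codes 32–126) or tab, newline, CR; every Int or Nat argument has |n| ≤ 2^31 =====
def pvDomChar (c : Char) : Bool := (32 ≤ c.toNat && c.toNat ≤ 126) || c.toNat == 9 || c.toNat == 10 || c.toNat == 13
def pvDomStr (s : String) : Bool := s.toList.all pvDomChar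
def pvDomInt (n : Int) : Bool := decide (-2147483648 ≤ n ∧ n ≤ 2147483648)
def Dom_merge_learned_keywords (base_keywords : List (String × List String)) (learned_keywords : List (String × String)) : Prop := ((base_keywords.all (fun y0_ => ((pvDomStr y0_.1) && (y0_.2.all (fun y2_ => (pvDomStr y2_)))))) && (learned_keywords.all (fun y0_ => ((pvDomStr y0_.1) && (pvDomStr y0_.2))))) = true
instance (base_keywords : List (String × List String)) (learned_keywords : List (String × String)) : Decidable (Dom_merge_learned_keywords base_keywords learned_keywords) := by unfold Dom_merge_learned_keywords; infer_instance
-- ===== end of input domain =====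

-- B groups the learned keywords into per-feature-type buckets first and merges them
-- into the base map in a second pass (objective: a different, two-pass decomposition).

-- ===== PORT A =====
def pvFTV : PySem.Set String := PySem.Set.ofList
  ["unit", "opening", "fixture", "detail", "level", "building", "venue", "amenity",
   "anchor", "geofence", "kiosk", "occupant", "relationship", "section", "facility"]

-- merged = deepcopy(base); for keyword, feature_type in learned.items(): skip invalid;
-- merged.setdefault(ft, set()).add(keyword.lower())  [= Dict.modify ft [] (·.add keyword.lower())]
def merge_learned_keywords (base_keywords : List (String × List String)) (learned_keywords : List (String × String)) : List (String × List String) :=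
  (learned_keywords.foldl
    (fun (merged : PySem.Dict String (List String)) (p : String × String) =>
      if PySem.Set.contains pvFTV p.2 then
        merged.modify p.2 [] (fun s => PySem.Set.add s (PySem.Str.lower p.1))
      else merged)
    (PySem.Dict.mk base_keywords)).items

-- ===== PORT B =====
def merge_learned_keywords_alt (base_keywords : List (String × List String)) (learned_keywords : List (String × String)) : List (String × List String) :=
  -- valid = [(ft, kw.lower()) for kw, ft in learned.items() if ft in FEATURE_TYPE_VALUES]
  let valid : List (String × String) :=
    (learned_keywords.filter (fun p => PySem.Set.contains pvFTV p.2)).map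
      (fun p => (p.2, PySem.Str.lower p.1))
  -- buckets: for ft, kw in valid: buckets.setdefault(ft, set()).add(kw)
  let buckets : PySem.Dict String (List String) :=
    valid.foldl (fun b q => b.modify q.1 [] (fun s => PySem.Set.add s q.2)) PySem.Dict.empty
  -- merged = {ft: kws | buckets.pop(ft, set()) for ft, kws in base.items()}; merged.update(buckets)
  let st :=
    base_keywords.foldl
      (fun (acc : List (String × List String) × PySem.Dict String (List String)) (p : String × List String) =>
        (acc.1 ++ [(p.1, PySem.Set.union p.2 (acc.2.getD p.1 []))], acc.2.erase p.1))
      ([], buckets)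
  st.1 ++ st.2.items

-- ===== PRECONDITION & SPEC =====
-- Pre_ only requires base_keywords' keys to be pairwise distinct: an association list with a
-- repeated key does not represent any Python dict (the argument's type is dict[str, set[str]]),
-- so no input of the Python function is excluded.
def Pre_merge_learned_keywords (base_keywords : List (String × List String)) (learned_keywords : List (String × String)) : Prop :=
  (base_keywords.map Prod.fst).Nodup

instance (base_keywords : List (String × List String)) (learned_keywords : List (String × String)) : Decidable (Pre_merge_learned_keywords base_keywords learned_keywords) := by unfold Pre_merge_learned_keywords; infer_instance

def pvWitness_merge_learned_keywords : (List (String × List String)) × (List (String × String)) :=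
  ([("unit", ["desk"]), ("level", [])], [("Lobby", "level"), ("weird", "nosuch"), ("Desk", "unit")])

def Spec_merge_learned_keywords (base_keywords : List (String × List String)) (learned_keywords : List (String × String)) (out : List (String × List String)) : Prop := out = merge_learned_keywords_alt base_keywords learned_keywords
instance (base_keywords : List (String × List String)) (learned_keywords : List (String × String)) (out : List (String × List String)) : Decidable (Spec_merge_learned_keywords base_keywords learned_keywords out) := by unfold Spec_merge_learned_keywords; infer_instance

-- ===== CLAIM (what is proved, stated in full; the proofs are below) =====
def Claim_equal_merge_learned_keywords : Prop := ∀ (base_keywords : List (String × List String)) (learned_keywords : List (String × String)), Dom_merge_learned_keywords base_keywords learned_keywords → Pre_merge_learned_keywords base_keywords learned_keywords → Spec_merge_learned_keywords base_keywords learned_keywords (merge_learned_keywords base_keywords learned_keywords)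

-- ===== LEMMAS AND PROOFS =====

-- A's loop body, as a function of the running dict.
def pvStep (d : PySem.Dict String (List String)) (p : String × String) : PySem.Dict String (List String) :=
  if PySem.Set.contains pvFTV p.2 then
    d.modify p.2 [] (fun s => PySem.Set.add s (PySem.Str.lower p.1))
  else d

-- Proof-only recursive form of B's second pass.
def pvComb : List (String × List String) → PySem.Dict String (List String) → List (String × List String)
  | [], bk => bk.items
  | p :: rest, bk => (p.1, PySem.Set.union p.2 (bk.getD p.1 [])) :: pvComb rest (bk.erase p.1)

theorem pvComb_empty (base : List (String × List String)) : pvComb base PySem.Dict.empty = base := by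
  induction base with
  | nil => rfl
  | cons p rest ih =>
    show (p.1, PySem.Set.union p.2 (PySem.Dict.getD PySem.Dict.empty p.1 [])) ::
        pvComb rest (PySem.Dict.erase PySem.Dict.empty p.1) = p :: rest
    have h1 : PySem.Dict.erase (PySem.Dict.empty (κ := String) (ν := List String)) p.1 = PySem.Dict.empty := rfl
    rw [h1, ih]
    rfl

theorem pvFold2_eq_pvComb (base : List (String × List String)) (acc : List (String × List String)) (bk : PySem.Dict String (List String)) :
    (base.foldl
      (fun (acc : List (String × List String) × PySem.Dict String (List String)) (p : String × List String) =>
        (acc.1 ++ [(p.1, PySem.Set.union p.2 (acc.2.getD p.1 []))], acc.2.erase p.1))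
      (acc, bk)).1 ++
    (base.foldl
      (fun (acc : List (String × List String) × PySem.Dict String (List String)) (p : String × List String) =>
        (acc.1 ++ [(p.1, PySem.Set.union p.2 (acc.2.getD p.1 []))], acc.2.erase p.1))
      (acc, bk)).2.items = acc ++ pvComb base bk := by
  induction base generalizing acc bk with
  | nil => rfl
  | cons p rest ih =>
    simp only [List.foldl_cons]
    rw [ih]
    simp [pvComb]

theorem pvBucket_eq_foldl_step (l : List (String × String)) (b : PySem.Dict String (List String)) :
    ((l.filter (fun p => PySem.Set.contains pvFTV p.2)).map (fun p => (p.2, PySem.Str.lower p.1))).foldl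
      (fun b q => b.modify q.1 [] (fun s => PySem.Set.add s q.2)) b = l.foldl pvStep b := by
  induction l generalizing b with
  | nil => rfl
  | cons p t ih =>
    by_cases h : PySem.Set.contains pvFTV p.2 = true
    · simp only [List.filter_cons, h, List.map_cons, List.foldl_cons, pvStep, if_true]
      exact ih _
    · simp only [List.filter_cons, h, List.foldl_cons, pvStep, Bool.false_eq_true, if_false]
      exact ih _

-- x already in t: adding it is a no-op; otherwise both sides append x.
-- x already in t: adding it is a no-op on the union too; otherwise both sides append x.
theorem pv_union_add_right (s t : List String) (x : String) :
    PySem.Set.union s (PySem.Set.add t x) = PySem.Set.add (PySem.Set.union s t) x := by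
  by_cases hx : x ∈ t
  · have h1 : PySem.Set.add t x = t := by simp [PySem.Set.add, hx]
    have hmem : x ∈ PySem.Set.union s t := (PySem.Set.mem_union _ _ _).mpr (Or.inr hx)
    have h2 : PySem.Set.add (PySem.Set.union s t) x = PySem.Set.union s t := by
      simp [PySem.Set.add, hmem]
    rw [h1, h2]
  · have h1 : PySem.Set.add t x = t ++ [x] := by simp [PySem.Set.add, hx]
    rw [h1]
    show List.foldl PySem.Set.add s (t ++ [x]) = PySem.Set.add (List.foldl PySem.Set.add s t) x
    rw [List.foldl_append]
    rfl

theorem pv_getD_erase_of_ne (bk : PySem.Dict String (List String)) (k k' : String) (hne : k' ≠ k) :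
    (bk.erase k).getD k' [] = bk.getD k' [] := by
  obtain ⟨l⟩ := bk
  simp only [PySem.Dict.getD, PySem.Dict.get?, PySem.Dict.erase]
  induction l with
  | nil => rfl
  | cons q t ih =>
    by_cases hq : q.1 = k
    · rw [List.filter_cons_of_neg (by simp [hq]), List.find?_cons_of_neg (by simp [hq]; exact fun h => hne h.symm)]
      exact ih
    · rw [List.filter_cons_of_pos (by simp [hq])]
      by_cases hq' : q.1 = k'
      · rw [List.find?_cons_of_pos (by simp [hq']), List.find?_cons_of_pos (by simp [hq'])]
      · rw [List.find?_cons_of_neg (by simp [hq']), List.find?_cons_of_neg (by simp [hq'])]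
        exact ih

theorem pv_filter_map_drop (t : List (String × List String)) (k : String) (v : List String) :
    (t.map (fun q => if q.1 == k then (k, v) else q)).filter (fun q => !q.1 == k) =
      t.filter (fun q => !q.1 == k) := by
  induction t with
  | nil => rfl
  | cons q t ih =>
    by_cases hq : q.1 = k
    · rw [List.map_cons, if_pos (by simp [hq]), List.filter_cons_of_neg (by simp),
        List.filter_cons_of_neg (by simp [hq])]
      exact ih
    · rw [List.map_cons, if_neg (by simp [hq]), List.filter_cons_of_pos (by simp [hq]),
        List.filter_cons_of_pos (by simp [hq]), ih]

theorem pv_erase_insert_self (bk : PySem.Dict String (List String)) (k : String) (v : List String) :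
    (bk.insert k v).erase k = bk.erase k := by
  obtain ⟨l⟩ := bk
  simp only [PySem.Dict.insert, PySem.Dict.contains, PySem.Dict.erase]
  by_cases hc : l.any (fun p => p.1 == k) = true
  · simp only [hc, if_true]
    exact congrArg PySem.Dict.mk (pv_filter_map_drop l k v)
  · simp only [hc, Bool.false_eq_true, if_false]
    exact congrArg PySem.Dict.mk (by rw [List.filter_append, List.filter_cons_of_neg (by simp), List.filter_nil, List.append_nil])

theorem pv_contains_erase_of_ne (bk : PySem.Dict String (List String)) (k k' : String) (hne : k' ≠ k) :
    (bk.erase k).contains k' = bk.contains k' := by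
  obtain ⟨l⟩ := bk
  simp only [PySem.Dict.contains, PySem.Dict.erase]
  induction l with
  | nil => rfl
  | cons q t ih =>
    by_cases hq : q.1 = k
    · have hq' : (q.1 == k') = false := by
        rw [hq]
        exact beq_eq_false_iff_ne.mpr (fun h => hne h.symm)
      rw [List.filter_cons_of_neg (by simp [hq]), List.any_cons, hq', Bool.false_or]
      exact ih
    · rw [List.filter_cons_of_pos (by simp [hq]), List.any_cons, List.any_cons, ih]

theorem pv_filter_map_comm (l : List (String × List String)) (k k' : String) (v : List String)
    (hne : k ≠ k') :
    (l.map (fun q => if q.1 == k then (k, v) else q)).filter (fun q => !q.1 == k') =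
      (l.filter (fun q => !q.1 == k')).map (fun q => if q.1 == k then (k, v) else q) := by
  induction l with
  | nil => rfl
  | cons q t ih =>
    by_cases hq : q.1 = k
    · have hqk' : ¬ q.1 = k' := by rw [hq]; exact hne
      rw [List.map_cons, if_pos (by simp [hq]), List.filter_cons_of_pos (by simpa using hne),
        List.filter_cons_of_pos (by simpa using hqk'), List.map_cons, if_pos (by simp [hq]), ih]
    · by_cases hq' : q.1 = k'
      · rw [List.map_cons, if_neg (by simp [hq]), List.filter_cons_of_neg (by simpa using hq'),
          List.filter_cons_of_neg (by simpa using hq'), ih]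
      · rw [List.map_cons, if_neg (by simp [hq]), List.filter_cons_of_pos (by simpa using hq'),
          List.filter_cons_of_pos (by simpa using hq'), List.map_cons, if_neg (by simp [hq]), ih]

theorem pv_erase_insert_comm (bk : PySem.Dict String (List String)) (k k' : String) (v : List String) (hne : k ≠ k') :
    (bk.insert k v).erase k' = (bk.erase k').insert k v := by
  have hc' := pv_contains_erase_of_ne bk k' k hne
  by_cases hc : bk.contains k = true
  · have e1 : bk.insert k v =
        PySem.Dict.mk (bk.items.map (fun q => if q.1 == k then (k, v) else q)) := by
      simp [PySem.Dict.insert, hc]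
    have e2 : (bk.erase k').insert k v =
        PySem.Dict.mk ((bk.erase k').items.map (fun q => if q.1 == k then (k, v) else q)) := by
      simp [PySem.Dict.insert, hc'.trans hc]
    rw [e1, e2]
    exact congrArg PySem.Dict.mk (pv_filter_map_comm bk.items k k' v hne)
  · have hcf : bk.contains k = false := by simpa using hc
    have e1 : bk.insert k v = PySem.Dict.mk (bk.items ++ [(k, v)]) := by
      simp [PySem.Dict.insert, hcf]
    have e2 : (bk.erase k').insert k v = PySem.Dict.mk ((bk.erase k').items ++ [(k, v)]) := by
      simp [PySem.Dict.insert, hc'.trans hcf]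
    rw [e1, e2]
    exact congrArg PySem.Dict.mk (by
      rw [List.filter_append, List.filter_cons_of_pos (by simpa using hne), List.filter_nil]
      rfl)

theorem pv_mem_keys_comb (base : List (String × List String)) (bk : PySem.Dict String (List String)) (k : String)
    (hk : k ∈ (pvComb base bk).map Prod.fst) :
    k ∈ base.map Prod.fst ∨ k ∈ bk.items.map Prod.fst := by
  induction base generalizing bk with
  | nil => exact Or.inr hk
  | cons p rest ih =>
    simp only [pvComb, List.map_cons, List.mem_cons] at hk
    rcases hk with h | h
    · exact Or.inl (by simp [h])
    · rcases ih (bk.erase p.1) h with h1 | h1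
      · exact Or.inl (by simp [h1])
      · right
        obtain ⟨q, hq, hq2⟩ := List.mem_map.mp h1
        have : q ∈ bk.items := List.mem_of_mem_filter hq
        exact List.mem_map.mpr ⟨q, this, hq2⟩

theorem pv_map_replace_eq_self (T : List (String × List String)) (ft : String) (v : List String)
    (h : ft ∉ T.map Prod.fst) :
    T.map (fun q => if q.1 == ft then (ft, v) else q) = T := by
  induction T with
  | nil => rfl
  | cons q t ih =>
    simp only [List.map_cons, List.mem_cons, not_or] at h
    have hq : ¬ q.1 = ft := fun hh => h.1 hh.symm
    rw [List.map_cons, if_neg (by simp [hq]), ih h.2]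

theorem pv_insert_mk_cons_ne (a ft : String) (u v : List String) (T : List (String × List String))
    (hne : ¬ a = ft) :
    ((PySem.Dict.mk ((a, u) :: T)).insert ft v).items = (a, u) :: ((PySem.Dict.mk T).insert ft v).items := by
  simp only [PySem.Dict.insert, PySem.Dict.contains]
  by_cases hc : T.any (fun p => p.1 == ft) = true
  · simp [List.any_cons, hne, hc]
  · simp [List.any_cons, hne, hc]

-- One merge step on A's running dict corresponds to one step on B's bucket dict.
theorem pvStepLemma (base : List (String × List String)) (bk : PySem.Dict String (List String))
    (ft x : String) (hnd : (base.map Prod.fst).Nodup) :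
    ((PySem.Dict.mk (pvComb base bk)).modify ft [] (fun s => PySem.Set.add s x)).items =
      pvComb base (bk.modify ft [] (fun s => PySem.Set.add s x)) := by
  revert hnd
  induction base generalizing bk with
  | nil => intro _; rfl
  | cons p rest ih =>
    intro hnd
    rw [List.map_cons, List.nodup_cons] at hnd
    obtain ⟨hnotin, hnd'⟩ := hnd
    simp only [pvComb]
    by_cases h : p.1 = ft
    · have hft_tail : ft ∉ (pvComb rest (bk.erase p.1)).map Prod.fst := by
        intro hmem
        rcases pv_mem_keys_comb rest (bk.erase p.1) ft hmem with h1 | h1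
        · exact hnotin (h ▸ h1)
        · obtain ⟨q, hq, hq2⟩ := List.mem_map.mp h1
          have hpred := List.of_mem_filter hq
          rw [hq2] at hpred
          simp [h] at hpred
      have hcon : (PySem.Dict.mk ((p.1, PySem.Set.union p.2 (bk.getD p.1 [])) :: pvComb rest (bk.erase p.1))).contains ft = true := by
        simp [PySem.Dict.contains, h]
      have hget : (PySem.Dict.mk ((p.1, PySem.Set.union p.2 (bk.getD p.1 [])) :: pvComb rest (bk.erase p.1))).getD ft [] =
          PySem.Set.union p.2 (bk.getD p.1 []) := by
        simp only [PySem.Dict.getD, PySem.Dict.get?]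
        rw [List.find?_cons_of_pos (by simp [h])]
        rfl
      simp only [PySem.Dict.modify, hget, PySem.Dict.insert, hcon, if_true]
      rw [List.map_cons, if_pos (by simp [h]), pv_map_replace_eq_self _ _ _ hft_tail]
      have hrget : (bk.insert ft (PySem.Set.add (bk.getD ft []) x)).getD p.1 [] =
          PySem.Set.add (bk.getD ft []) x := by
        rw [h]
        simp [PySem.Dict.getD, PySem.Dict.get?_insert_self]
      show _ = (p.1, PySem.Set.union p.2 ((bk.insert ft (PySem.Set.add (bk.getD ft []) x)).getD p.1 [])) ::
          pvComb rest ((bk.insert ft (PySem.Set.add (bk.getD ft []) x)).erase p.1)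
      rw [hrget, pv_union_add_right, h, pv_erase_insert_self]
    · have hget : (PySem.Dict.mk ((p.1, PySem.Set.union p.2 (bk.getD p.1 [])) :: pvComb rest (bk.erase p.1))).getD ft [] =
          (PySem.Dict.mk (pvComb rest (bk.erase p.1))).getD ft [] := by
        simp only [PySem.Dict.getD, PySem.Dict.get?]
        rw [List.find?_cons_of_neg (by simp [h])]
      simp only [PySem.Dict.modify, hget]
      rw [pv_insert_mk_cons_ne p.1 ft _ _ _ h]
      have hfold : (PySem.Dict.mk (pvComb rest (bk.erase p.1))).insert ft
            (PySem.Set.add ((PySem.Dict.mk (pvComb rest (bk.erase p.1))).getD ft []) x) =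
          (PySem.Dict.mk (pvComb rest (bk.erase p.1))).modify ft [] (fun s => PySem.Set.add s x) := rfl
      rw [hfold, ih (bk.erase p.1) hnd']
      have h1 : (bk.insert ft (PySem.Set.add (bk.getD ft []) x)).getD p.1 [] = bk.getD p.1 [] :=
        PySem.Dict.getD_insert_of_ne bk _ _ h
      have h2 : (bk.insert ft (PySem.Set.add (bk.getD ft []) x)).erase p.1 =
          (bk.erase p.1).insert ft (PySem.Set.add ((bk.erase p.1).getD ft []) x) := by
        rw [pv_getD_erase_of_ne bk p.1 ft (fun hh => h hh.symm)]
        exact pv_erase_insert_comm bk ft p.1 _ (fun hh => h hh.symm)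
      show _ = (p.1, PySem.Set.union p.2 ((bk.insert ft (PySem.Set.add (bk.getD ft []) x)).getD p.1 [])) ::
          pvComb rest ((bk.insert ft (PySem.Set.add (bk.getD ft []) x)).erase p.1)
      rw [h1, h2]
      rfl

theorem pvFoldLemma (l : List (String × String)) (base : List (String × List String)) (bk : PySem.Dict String (List String)) (hnd : (base.map Prod.fst).Nodup) :
    (l.foldl pvStep (PySem.Dict.mk (pvComb base bk))).items = pvComb base (l.foldl pvStep bk) := by
  induction l generalizing bk with
  | nil => rfl
  | cons p t ih =>
    simp only [List.foldl_cons]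
    by_cases h : PySem.Set.contains pvFTV p.2 = true
    · have hstep : pvStep (PySem.Dict.mk (pvComb base bk)) p = PySem.Dict.mk (pvComb base (pvStep bk p)) := by
        apply PySem.Dict.ext
        simp only [pvStep, h, if_true]
        exact pvStepLemma base bk p.2 (PySem.Str.lower p.1) hnd
      rw [hstep]
      exact ih _
    · have h1 : pvStep (PySem.Dict.mk (pvComb base bk)) p = PySem.Dict.mk (pvComb base bk) := by
        simp only [pvStep]
        rw [if_neg h]
      have h2 : pvStep bk p = bk := by
        simp only [pvStep]
        rw [if_neg h]
      rw [h1, h2]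
      exact ih _

-- ===== VERDICT (by name: the statement is the Claim_ definition above) =====
theorem merge_learned_keywords_spec : Claim_equal_merge_learned_keywords := by
  intro base learned _ hpre
  have key := pvFoldLemma learned base PySem.Dict.empty hpre
  rw [pvComb_empty] at key
  refine key.trans ?_
  show pvComb base
      (learned.foldl pvStep PySem.Dict.empty) =
    (base.foldl
      (fun (acc : List (String × List String) × PySem.Dict String (List String)) (p : String × List String) =>
        (acc.1 ++ [(p.1, PySem.Set.union p.2 (acc.2.getD p.1 []))], acc.2.erase p.1))
      ([], ((learned.filter (fun p => PySem.Set.contains pvFTV p.2)).map (fun p => (p.2, PySem.Str.lower p.1))).foldl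
        (fun b q => b.modify q.1 [] (fun s => PySem.Set.add s q.2)) PySem.Dict.empty)).1 ++
    (base.foldl
      (fun (acc : List (String × List String) × PySem.Dict String (List String)) (p : String × List String) =>
        (acc.1 ++ [(p.1, PySem.Set.union p.2 (acc.2.getD p.1 []))], acc.2.erase p.1))
      ([], ((learned.filter (fun p => PySem.Set.contains pvFTV p.2)).map (fun p => (p.2, PySem.Str.lower p.1))).foldl
        (fun b q => b.modify q.1 [] (fun s => PySem.Set.add s q.2)) PySem.Dict.empty)).2.items
  rw [pvFold2_eq_pvComb, List.nil_append, pvBucket_eq_foldl_step]
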